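-- pv_equiv track=rewrite | github.com/cthunman/poker | src/ComboUtils.py | select_combinations
-- ===== SOURCE A (Python) =====
-- import itertools
--
-- def select_combinations(combo_list):
--     combos = []
--     for combo in combo_list:
--         combos.append(itertools.combinations(combo[0], combo[1]))
--
--     combined_results = itertools.product(*combos)
--     result_list = []
--     for r in combined_results:
--         result_list.append([i for sub in r for i in sub])
--
--     return result_list
-- ===== SOURCE B (Python) =====
-- def _combs(pool, r):
--     # k-combinations in the same (lexicographic-by-index) order as itertools.combinations
--     if r == 0:
--         return [[]]
--     if len(pool) < r:
--         return []
--     head, rest = pool[0], pool[1:]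
--     return [[head] + c for c in _combs(rest, r - 1)] + _combs(rest, r)
--
--
-- def select_combinations(combo_list):
--     result = [[]]
--     for pool, r in combo_list:
--         combs = _combs(list(pool), r)
--         result = [acc + c for acc in result for c in combs]
--     return result
-- ===== Notes on version B (the rewrite author's own statement) =====
-- stated objective: alternative
-- what changed: Replaces itertools.combinations + itertools.product + flatten-each-tuple with a hand-written recursive combinations generator and an incremental group-by-group fold that extends each accumulated prefix in place, never materializing tuples of tuples.
import Mathlib
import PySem

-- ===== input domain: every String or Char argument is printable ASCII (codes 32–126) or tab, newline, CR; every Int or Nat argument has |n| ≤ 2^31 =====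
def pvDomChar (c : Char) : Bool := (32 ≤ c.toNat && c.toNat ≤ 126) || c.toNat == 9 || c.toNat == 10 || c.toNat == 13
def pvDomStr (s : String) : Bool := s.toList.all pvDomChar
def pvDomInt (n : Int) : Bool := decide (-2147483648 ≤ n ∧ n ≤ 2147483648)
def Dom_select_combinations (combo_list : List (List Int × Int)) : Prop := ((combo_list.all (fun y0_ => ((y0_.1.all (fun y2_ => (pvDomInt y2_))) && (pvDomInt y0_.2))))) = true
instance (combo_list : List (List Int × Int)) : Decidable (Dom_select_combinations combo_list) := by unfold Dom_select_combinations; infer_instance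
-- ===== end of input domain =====

-- B builds the result by an incremental fold over the groups with a hand-written recursive
-- combinations generator, instead of A's itertools.product over per-group combinations
-- followed by flattening each tuple; alternative decomposition, same cost.

-- ===== PORT A =====
-- itertools.combinations(pool, k): exact transcription of its documented output order
-- (lexicographic by index); k comes from a Python int that Pre_ guarantees nonnegative.
def pyCombinations : List Int → Nat → List (List Int)
  | _, 0 => [[]]
  | [], _ + 1 => []
  | h :: t, k + 1 => (pyCombinations t k).map (fun c => h :: c) ++ pyCombinations t (k + 1)

-- itertools.product(*combos): exact transcription (last factor varies fastest)
def pyProduct : List (List (List Int)) → List (List (List Int))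
  | [] => [[]]
  | l :: ls => l.flatMap (fun x => (pyProduct ls).map (fun rest => x :: rest))

def select_combinations (combo_list : List (List Int × Int)) : List (List Int) :=
  let combos := combo_list.map (fun combo => pyCombinations combo.1 combo.2.toNat)
  let combined_results := pyProduct combos
  combined_results.map (fun r => r.flatten)

-- ===== PORT B =====
-- _combs from Source B, step for step (the `match` realises pool[0] / pool[1:], which the
-- preceding length guard makes safe; exact for r ≥ 0, where Python B returns)
def combsB (pool : List Int) (r : Int) : List (List Int) :=
  if r = 0 then [[]]
  else if (pool.length : Int) < r then []
  else
    match pool with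
    | [] => []
    | head :: rest => ((combsB rest (r - 1)).map (fun c => head :: c)) ++ combsB rest r

def select_combinations_alt (combo_list : List (List Int × Int)) : List (List Int) :=
  combo_list.foldl
    (fun result c =>
      let combs := combsB c.1 c.2
      result.flatMap (fun acc => combs.map (fun cc => acc ++ cc)))
    [[]]

-- ===== PRECONDITION & SPEC =====
-- A raises ValueError (from itertools.combinations) whenever some group's count is negative;
-- Pre_ excludes exactly those inputs.
def Pre_select_combinations (combo_list : List (List Int × Int)) : Prop :=
  ∀ c ∈ combo_list, 0 ≤ c.2
instance (combo_list : List (List Int × Int)) : Decidable (Pre_select_combinations combo_list) := by unfold Pre_select_combinations; infer_instance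

def pvWitness_select_combinations : (List (List Int × Int)) := [([1, 2, 3], 2), ([4, 5], 1)]

def Spec_select_combinations (combo_list : List (List Int × Int)) (out : List (List Int)) : Prop := out = select_combinations_alt combo_list
instance (combo_list : List (List Int × Int)) (out : List (List Int)) : Decidable (Spec_select_combinations combo_list out) := by unfold Spec_select_combinations; infer_instance

-- ===== CLAIM (what is proved, stated in full; the proofs are below) =====
def Claim_equal_select_combinations : Prop := ∀ (combo_list : List (List Int × Int)), Dom_select_combinations combo_list → Pre_select_combinations combo_list → Spec_select_combinations combo_list (select_combinations combo_list)

-- ===== LEMMAS AND PROOFS =====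

-- for nonnegative r, B's combinations compute A's
theorem combsB_eq_pyCombinations (pool : List Int) (r : Int) (hr : 0 ≤ r) :
    combsB pool r = pyCombinations pool r.toNat := by
  induction pool generalizing r with
  | nil =>
    rw [combsB]
    rcases eq_or_lt_of_le hr with h | h
    · simp [← h, pyCombinations]
    · have : r.toNat = (r.toNat - 1) + 1 := by omega
      rw [this]
      simp [pyCombinations]
      omega
  | cons h t ih =>
    rw [combsB]
    rcases eq_or_lt_of_le hr with h0 | h0
    · simp [← h0, pyCombinations]
    · have hne : ¬ r = 0 := by omega
      have hrt : r.toNat = (r.toNat - 1) + 1 := by omega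
      by_cases hlen : ((h :: t).length : Int) < r
      · -- both sides empty: not enough elements
        have : pyCombinations (h :: t) r.toNat = [] := by
          -- length < r ⇒ empty; prove by auxiliary induction
          clear ih
          have : ∀ (l : List Int) (k : Nat), l.length < k → pyCombinations l k = [] := by
            intro l
            induction l with
            | nil => intro k hk; cases k with
              | zero => omega
              | succ k => simp [pyCombinations]
            | cons a b ihb =>
              intro k hk
              cases k with
              | zero => omega
              | succ k =>
                simp only [pyCombinations]
                rw [ihb k (by simp at hk ⊢; omega), ihb (k+1) (by simp at hk ⊢; omega)]
                simp
          exact this _ _ (by simp at hlen ⊢; omega)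
        rw [if_neg hne, if_pos hlen, this]
      · rw [hrt]
        simp only [pyCombinations, if_neg hne, if_neg hlen]
        rw [ih (r - 1) (by omega), ih r hr, ← hrt]
        have hN : (r - 1).toNat = r.toNat - 1 := by omega
        rw [hN]

theorem fm_assoc {α β γ : Type} (l : List α) (f : α → List β) (g : β → List γ) :
    (l.flatMap f).flatMap g = l.flatMap (fun a => (f a).flatMap g) := by
  induction l with
  | nil => rfl
  | cons a as ih => simp [List.flatMap_cons, List.flatMap_append, ih]

-- the incremental fold equals product-then-flatten
theorem foldl_prod_flatten (cl : List (List Int × Int)) (init : List (List Int))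
    (g : List Int × Int → List (List Int)) :
    cl.foldl (fun result c => result.flatMap (fun acc => (g c).map (fun cc => acc ++ cc))) init
      = init.flatMap (fun acc => (pyProduct (cl.map g)).map (fun r => acc ++ r.flatten)) := by
  induction cl generalizing init with
  | nil => simp [pyProduct]
  | cons c cs ih =>
    simp only [List.foldl_cons, List.map_cons, pyProduct]
    rw [ih, fm_assoc]
    apply List.flatMap_congr
    intro acc _
    simp only [List.flatMap_map, List.map_flatMap, List.map_map]
    apply List.flatMap_congr
    intro x _
    simp [Function.comp, List.append_assoc]

-- ===== VERDICT (by name: the statement is the Claim_ definition above) =====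
theorem select_combinations_spec : Claim_equal_select_combinations := by
  intro cl _hdom hpre
  unfold Spec_select_combinations select_combinations select_combinations_alt
  have hg : cl.foldl (fun result c => result.flatMap (fun acc => (combsB c.1 c.2).map (fun cc => acc ++ cc))) [[]]
      = cl.foldl (fun result c => result.flatMap (fun acc => (pyCombinations c.1 c.2.toNat).map (fun cc => acc ++ cc))) [[]] := by
    apply PySem.List.foldl_congr_mem
    intro b c hc
    rw [combsB_eq_pyCombinations c.1 c.2 (hpre c hc)]
  simp only [hg, foldl_prod_flatten]
  simp
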